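-- pv_equiv track=rewrite | github.com/PKPDAI/PKNER | pkner/models/utils.py | simplify_labels_and_tokens
-- ===== SOURCE A (Python) =====
-- from typing import List, Tuple, Dict
--
-- def simplify_labels_and_tokens(sample_tokens: List[str], sample_labels: List[str],
--                                irrelevant_label: str) -> Tuple[List[str], List[str]]:
--     """
--
--     @param sample_tokens: ["[CLS]", "hi", "##ho","hey", "huu", ".", "[SEP]", "[PAD]", "[PAD]"]
--     @param sample_labels: ["-", "B-PK", "-","I-PK", "O", "O", "[SEP]", "[PAD]", "[PAD]"]
--     @param irrelevant_label: "-"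
--     @return: ["hi", "##ho","hey", "huu", "."], ["B-PK", "I-PK","I-PK", "O", "O"]
--     """
--     sample_tokens_clean = []
--     sample_labels_clean = []
--     prev_label = None
--     for token, label in zip(sample_tokens, sample_labels):
--         if token not in ['[CLS]', '[SEP]', '[PAD]']:
--             sample_tokens_clean.append(token)
--             if label == irrelevant_label:
--                 if "B" in prev_label:
--                     new_label = "I-" + prev_label.split("-")[1]
--                 else:
--                     new_label = prev_label
--                 sample_labels_clean.append(new_label)
--                 prev_label = new_label
--             else:
--                 sample_labels_clean.append(label)
--                 prev_label = label
--     assert len(sample_tokens_clean) == len(sample_labels_clean)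
--     return sample_tokens_clean, sample_labels_clean
-- ===== SOURCE B (Python) =====
-- def simplify_labels_and_tokens(sample_tokens, sample_labels, irrelevant_label):
--     # Run-length strategy: drop the special tokens, then walk the kept labels
--     # jumping over each maximal run of the irrelevant label at once; the fill
--     # value is computed ONCE per run from the last emitted label (the resolution
--     # "I-" + prev.split("-")[1] if "B" in prev else prev is idempotent, so every
--     # element of the run receives that same value).
--     keep = [(t, l) for t, l in zip(sample_tokens, sample_labels)
--             if t not in ('[CLS]', '[SEP]', '[PAD]')]
--     tokens_clean = [t for t, _ in keep]
--     labels = [l for _, l in keep]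
--     labels_clean = []
--     i = 0
--     n = len(labels)
--     while i < n:
--         if labels[i] != irrelevant_label:
--             labels_clean.append(labels[i])
--             i += 1
--         else:
--             j = i
--             while j < n and labels[j] == irrelevant_label:
--                 j += 1
--             prev = labels_clean[-1] if labels_clean else None
--             fill = "I-" + prev.split("-")[1] if "B" in prev else prev
--             labels_clean.extend([fill] * (j - i))
--             i = j
--     assert len(tokens_clean) == len(labels_clean)
--     return tokens_clean, labels_clean
-- ===== Notes on version B (the rewrite author's own statement) =====
-- stated objective: alternative
-- what changed: B replaces A's per-token previous-label state machine by a run-length pass: after filtering out the special tokens it jumps over each maximal run of the irrelevant label at once and fills the whole run with a single resolved value computed once from the last emitted label (correct because the resolution 'I-'+prev.split('-')[1] if 'B' in prev else prev is idempotent, which is proved in Lean).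
import Mathlib
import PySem

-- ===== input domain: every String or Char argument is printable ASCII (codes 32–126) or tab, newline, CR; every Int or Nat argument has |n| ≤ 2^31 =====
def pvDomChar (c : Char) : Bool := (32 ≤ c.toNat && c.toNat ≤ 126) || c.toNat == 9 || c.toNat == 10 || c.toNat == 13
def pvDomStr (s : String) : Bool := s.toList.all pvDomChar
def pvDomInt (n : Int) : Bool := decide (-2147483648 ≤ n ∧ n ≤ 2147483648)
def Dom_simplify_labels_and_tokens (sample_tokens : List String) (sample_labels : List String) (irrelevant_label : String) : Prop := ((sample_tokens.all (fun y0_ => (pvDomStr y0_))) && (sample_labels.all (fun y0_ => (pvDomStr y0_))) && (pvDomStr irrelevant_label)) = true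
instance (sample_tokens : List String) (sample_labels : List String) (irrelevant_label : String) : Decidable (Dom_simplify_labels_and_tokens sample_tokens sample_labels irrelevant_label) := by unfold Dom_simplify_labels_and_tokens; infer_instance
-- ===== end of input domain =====

-- B replaces A's per-token previous-label state machine by a run-length pass: it filters the
-- special tokens out, then jumps over each maximal run of the irrelevant label and fills the
-- whole run with ONE resolved value (the resolution is idempotent; proved below).
-- Objective: alternative decomposition, same asymptotic cost.

-- Shared translation of the Python expression
--   "I-" + prev_label.split("-")[1] if "B" in prev_label else prev_label
-- which appears verbatim in both A and B.  Python raises TypeError when prev_label is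
-- None and IndexError when "B" in prev_label but "-" not in it; those inputs are outside
-- Pre_ and this helper returns defaults ("" pieces) there.
def pvResolve (prev : Option String) : String :=
  let pv := prev.getD ""
  if PySem.Str.isIn "B" pv then
    "I-" ++ ((PySem.List.pyGet? ((PySem.Str.split? pv "-").getD []) 1).getD "")
  else pv

-- ===== PORT A =====
-- the loop body of A, step for step (state: tokens_clean, labels_clean, prev_label)
def pvStepA (irrelevant_label : String)
    (st : List String × List String × Option String) (p : String × String) :
    List String × List String × Option String :=
  if !(["[CLS]", "[SEP]", "[PAD]"].contains p.1) then
    let tc := st.1 ++ [p.1]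
    if p.2 == irrelevant_label then
      let new_label := pvResolve st.2.2
      (tc, st.2.1 ++ [new_label], some new_label)
    else
      (tc, st.2.1 ++ [p.2], some p.2)
  else st

def simplify_labels_and_tokens (sample_tokens : List String) (sample_labels : List String) (irrelevant_label : String) : List String × List String :=
  let st := (sample_tokens.zip sample_labels).foldl (pvStepA irrelevant_label) ([], [], none)
  (st.1, st.2.1)

-- ===== PORT B =====
-- B's run-jumping loop over the kept labels: a non-irrelevant label is emitted and the scan
-- advances one step; at an irrelevant label the maximal run is measured, the fill value is
-- resolved once from the last emitted label, and the whole run is emitted at once.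
def pvFillRuns (irr : String) (out : List String) : List String → List String
  | [] => out
  | l :: ls =>
    if l != irr then pvFillRuns irr (out ++ [l]) ls
    else
      let fill := pvResolve out.getLast?
      let run := ls.takeWhile (fun x => x == irr)
      pvFillRuns irr (out ++ List.replicate (1 + run.length) fill) (ls.dropWhile (fun x => x == irr))
  termination_by ls => ls.length
  decreasing_by
    · simp
    · exact Nat.lt_succ_of_le (List.length_dropWhile_le _ _)

def simplify_labels_and_tokens_alt (sample_tokens : List String) (sample_labels : List String) (irrelevant_label : String) : List String × List String :=
  let kept := (sample_tokens.zip sample_labels).filter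
      (fun p => !(["[CLS]", "[SEP]", "[PAD]"].contains p.1))
  (kept.map Prod.fst, pvFillRuns irrelevant_label [] (kept.map Prod.snd))

-- ===== PRECONDITION & SPEC =====
-- Pre_ excludes exactly the inputs where Python A raises: a kept (non-special) position whose
-- label equals irrelevant_label but has no earlier kept non-irrelevant label (TypeError on
-- None), or whose closest such earlier label contains "B" without "-" (IndexError on split).
def pvKeptLabels (sample_tokens : List String) (sample_labels : List String) : List String :=
  ((sample_tokens.zip sample_labels).filter
      (fun p => !(["[CLS]", "[SEP]", "[PAD]"].contains p.1))).map Prod.snd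

def Pre_simplify_labels_and_tokens (sample_tokens : List String) (sample_labels : List String) (irrelevant_label : String) : Prop :=
  ∀ i, i < (pvKeptLabels sample_tokens sample_labels).length → (pvKeptLabels sample_tokens sample_labels).getD i "" = irrelevant_label →
    ∃ j, j < i ∧ (pvKeptLabels sample_tokens sample_labels).getD j "" ≠ irrelevant_label ∧
      (∀ k, k < i → j < k → (pvKeptLabels sample_tokens sample_labels).getD k "" = irrelevant_label) ∧
      ¬(PySem.Str.isIn "B" ((pvKeptLabels sample_tokens sample_labels).getD j "") = true ∧ PySem.Str.isIn "-" ((pvKeptLabels sample_tokens sample_labels).getD j "") = false)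
instance (sample_tokens : List String) (sample_labels : List String) (irrelevant_label : String) : Decidable (Pre_simplify_labels_and_tokens sample_tokens sample_labels irrelevant_label) := by unfold Pre_simplify_labels_and_tokens; infer_instance

def pvWitness_simplify_labels_and_tokens : List String × List String × String :=
  (["[CLS]", "hi", "##ho", "hey", "huu", ".", "[SEP]"],
   ["-", "B-PK", "-", "I-PK", "O", "O", "[SEP]"], "-")

def Spec_simplify_labels_and_tokens (sample_tokens : List String) (sample_labels : List String) (irrelevant_label : String) (out : List String × List String) : Prop := out = simplify_labels_and_tokens_alt sample_tokens sample_labels irrelevant_label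
instance (sample_tokens : List String) (sample_labels : List String) (irrelevant_label : String) (out : List String × List String) : Decidable (Spec_simplify_labels_and_tokens sample_tokens sample_labels irrelevant_label out) := by unfold Spec_simplify_labels_and_tokens; infer_instance

-- ===== CLAIM (what is proved, stated in full; the proofs are below) =====
def Claim_equal_simplify_labels_and_tokens : Prop := ∀ (sample_tokens : List String) (sample_labels : List String) (irrelevant_label : String), Dom_simplify_labels_and_tokens sample_tokens sample_labels irrelevant_label → Pre_simplify_labels_and_tokens sample_tokens sample_labels irrelevant_label → Spec_simplify_labels_and_tokens sample_tokens sample_labels irrelevant_label (simplify_labels_and_tokens sample_tokens sample_labels irrelevant_label)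

-- ===== LEMMAS AND PROOFS =====

-- proof-side description of A's per-element label pass over the kept labels
def pvFill (irrelevant_label : String) (prev : Option String) : List String → List String
  | [] => []
  | l :: ls =>
    let l' := if l == irrelevant_label then pvResolve prev else l
    l' :: pvFill irrelevant_label (some l') ls

-- prev_label after processing a list of kept labels
def pvPrevAfter (irrelevant_label : String) (prev : Option String) : List String → Option String
  | [] => prev
  | l :: ls =>
    pvPrevAfter irrelevant_label
      (some (if l == irrelevant_label then pvResolve prev else l)) ls

lemma foldA_eq (irr : String) :
    ∀ (zs : List (String × String)) (tc lc : List String) (prev : Option String),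
      zs.foldl (pvStepA irr) (tc, lc, prev) =
        (tc ++ ((zs.filter (fun p => !(["[CLS]", "[SEP]", "[PAD]"].contains p.1))).map Prod.fst),
         lc ++ pvFill irr prev ((zs.filter (fun p => !(["[CLS]", "[SEP]", "[PAD]"].contains p.1))).map Prod.snd),
         pvPrevAfter irr prev ((zs.filter (fun p => !(["[CLS]", "[SEP]", "[PAD]"].contains p.1))).map Prod.snd)) := by
  intro zs
  induction zs with
  | nil => intro tc lc prev; simp [pvFill, pvPrevAfter]
  | cons hd tl ih =>
    intro tc lc prev
    by_cases hs : hd.1 = "[CLS]" ∨ hd.1 = "[SEP]" ∨ hd.1 = "[PAD]"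
    · rcases hs with h | h | h <;>
        simp [List.foldl_cons, pvStepA, h, ih]
    · push Not at hs
      obtain ⟨h1, h2, h3⟩ := hs
      by_cases hl : hd.2 = irr
      · simp [List.foldl_cons, pvStepA, h1, h2, h3, hl, ih,
              pvFill, pvPrevAfter, List.append_assoc]
      · simp [List.foldl_cons, pvStepA, h1, h2, h3, hl, ih,
              pvFill, pvPrevAfter, List.append_assoc]

-- splitOn.go appends its pre-collected pieces (acc) at the front

lemma go_acc (sep : List Char) :
    ∀ (fuel : Nat) (l cur : List Char) (acc : List (List Char)),
      PySem.Chars.splitOn.go sep fuel l cur acc =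
        acc.reverse ++ PySem.Chars.splitOn.go sep fuel l cur [] := by
  intro fuel
  induction fuel with
  | zero => intro l cur acc; simp [PySem.Chars.splitOn.go]
  | succ f ih =>
    intro l cur acc
    cases l with
    | nil => simp [PySem.Chars.splitOn.go]
    | cons d rest =>
      rw [PySem.Chars.splitOn.go, PySem.Chars.splitOn.go]
      split_ifs with hp
      · rw [ih, ih _ _ [cur.reverse]]; simp
      · rw [ih, ih _ (d :: cur) []]

lemma go_no_sep (c : Char) :
    ∀ (l : List Char) (fuel : Nat) (cur : List Char) (acc : List (List Char)),
      l.length ≤ fuel → c ∉ l →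
      PySem.Chars.splitOn.go [c] fuel l cur acc = acc.reverse ++ [cur.reverse ++ l] := by
  intro l
  induction l with
  | nil =>
    intro fuel cur acc _ _
    cases fuel <;> simp [PySem.Chars.splitOn.go]
  | cons d rest ih =>
    intro fuel cur acc hf hm
    cases fuel with
    | zero => simp at hf
    | succ f =>
      rw [PySem.Chars.splitOn.go]
      have hd : ¬ ([c].isPrefixOf (d :: rest) = true) := by
        simp [List.isPrefixOf]
        intro h; exact absurd h.symm (fun h' => hm (by simp [h']))
      rw [if_neg hd]
      rw [ih f (d :: cur) acc (by simpa using hf)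
            (fun h => hm (List.mem_cons_of_mem _ h))]
      simp

lemma go_first (c : Char) :
    ∀ (pre : List Char) (rest : List Char) (fuel : Nat) (cur : List Char) (acc : List (List Char)),
      pre.length < fuel → c ∉ pre →
      PySem.Chars.splitOn.go [c] fuel (pre ++ c :: rest) cur acc =
        PySem.Chars.splitOn.go [c] (fuel - (pre.length + 1)) rest [] ((cur.reverse ++ pre) :: acc) := by
  intro pre
  induction pre with
  | nil =>
    intro rest fuel cur acc hf _
    cases fuel with
    | zero => omega
    | succ f =>
      simp only [List.nil_append]
      rw [PySem.Chars.splitOn.go]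
      have : ([c].isPrefixOf (c :: rest)) = true := by simp [List.isPrefixOf]
      rw [if_pos this]
      simp
  | cons d pre' ih =>
    intro rest fuel cur acc hf hm
    cases fuel with
    | zero => simp at hf
    | succ f =>
      simp only [List.cons_append]
      rw [PySem.Chars.splitOn.go]
      have hd : ¬ ([c].isPrefixOf (d :: (pre' ++ c :: rest)) = true) := by
        simp [List.isPrefixOf]
        intro h; exact absurd h.symm (fun h' => hm (by simp [h']))
      rw [if_neg hd]
      rw [ih rest f (d :: cur) acc (by simpa using hf)
            (fun h => hm (List.mem_cons_of_mem _ h))]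
      have h1 : f - (pre'.length + 1) = f + 1 - ((d :: pre').length + 1) := by
        simp only [List.length_cons]; omega
      have h2 : (d :: cur).reverse ++ pre' = cur.reverse ++ d :: pre' := by simp
      rw [h2, h1]

lemma splitOn_no_sep (c : Char) (l : List Char) (h : c ∉ l) :
    PySem.Chars.splitOn l [c] = [l] := by
  unfold PySem.Chars.splitOn
  rw [go_no_sep c l (l.length + 1) [] [] (by omega) h]
  simp

lemma splitOn_first (c : Char) (pre rest : List Char) (h : c ∉ pre) :
    PySem.Chars.splitOn (pre ++ c :: rest) [c] = pre :: PySem.Chars.splitOn rest [c] := by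
  unfold PySem.Chars.splitOn
  rw [go_first c pre rest _ _ _ (by simp) h]
  rw [go_acc]
  have : (pre ++ c :: rest).length + 1 - (pre.length + 1) = rest.length + 1 := by simp
  rw [this]
  simp

lemma go_pieces_no_sep (c : Char) :
    ∀ (l : List Char) (fuel : Nat) (cur : List Char) (acc : List (List Char)),
      l.length ≤ fuel → c ∉ cur → (∀ x ∈ acc, c ∉ x) →
      ∀ x ∈ PySem.Chars.splitOn.go [c] fuel l cur acc, c ∉ x := by
  intro l
  induction l with
  | nil =>
    intro fuel cur acc _ hcur hacc x hx
    cases fuel <;> simp [PySem.Chars.splitOn.go] at hx <;>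
      rcases hx with hx | rfl
    · exact hacc x hx
    · simpa using hcur
    · exact hacc x hx
    · simpa using hcur
  | cons d rest ih =>
    intro fuel cur acc hf hcur hacc x hx
    cases fuel with
    | zero => simp at hf
    | succ f =>
      rw [PySem.Chars.splitOn.go] at hx
      by_cases hp : ([c].isPrefixOf (d :: rest)) = true
      · rw [if_pos hp] at hx
        refine ih f [] (cur.reverse :: acc) (by simpa using hf) (by simp) ?_ x (by simpa using hx)
        intro y hy
        rcases List.mem_cons.mp hy with hy | hy
        · subst hy; simpa using hcur
        · exact hacc y hy
      · rw [if_neg hp] at hx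
        have hdc : d ≠ c := by
          intro h; exact hp (by simp [List.isPrefixOf, h])
        refine ih f (d :: cur) acc (by simpa using hf) ?_ hacc x hx
        simp [hcur]; exact fun h => hdc h.symm

lemma splitOn_pieces_no_sep (c : Char) (l : List Char) :
    ∀ x ∈ PySem.Chars.splitOn l [c], c ∉ x := by
  exact go_pieces_no_sep c l (l.length + 1) [] [] (by omega) (by simp) (by simp)

-- a value obtained by pyGet? is an element of the list
lemma mem_of_pyGet? {a : Type} (l : List a) (i : Int) (x : a)
    (h : PySem.List.pyGet? l i = some x) : x ∈ l := by
  unfold PySem.List.pyGet? at h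
  obtain ⟨k, -, hk⟩ := Option.bind_eq_some_iff.mp h
  exact List.mem_of_getElem? hk

-- the resolution step is idempotent
lemma pvResolve_eq_of_isIn (p : Option String) (h : PySem.Str.isIn "B" (p.getD "") = true) :
    pvResolve p = "I-" ++ ((PySem.List.pyGet? ((PySem.Str.split? (p.getD "") "-").getD []) 1).getD "") := by
  unfold pvResolve
  rw [if_pos h]

lemma pvResolve_eq_of_not_isIn (p : Option String) (h : PySem.Str.isIn "B" (p.getD "") = false) :
    pvResolve p = p.getD "" := by
  unfold pvResolve
  rw [if_neg (by simp only [h]; exact Bool.false_ne_true)]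

lemma pvResolve_idem (p : Option String) :
    pvResolve (some (pvResolve p)) = pvResolve p := by
  cases hB : PySem.Str.isIn "B" (p.getD "") with
  | false =>
    rw [pvResolve_eq_of_not_isIn p hB, pvResolve_eq_of_not_isIn _ (by simpa using hB)]
    rfl
  | true =>
    rw [pvResolve_eq_of_isIn p hB]
    obtain ⟨L, hL, hLmap⟩ : ∃ L, PySem.Str.split? (p.getD "") "-" = some L ∧
        L.map String.toList = PySem.Chars.splitOn (p.getD "").toList ['-'] := by
      have h := PySem.Str.split?_map (p.getD "") "-"
      cases hsp : PySem.Str.split? (p.getD "") "-" with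
      | none => rw [hsp] at h; simp [PySem.Chars.split?] at h
      | some L => exact ⟨L, rfl, by rw [hsp] at h; simpa [PySem.Chars.split?] using h⟩
    set s := ((PySem.List.pyGet? ((PySem.Str.split? (p.getD "") "-").getD []) 1).getD "") with hs
    have hsL : s = (PySem.List.pyGet? L 1).getD "" := by rw [hs, hL]; rfl
    have hnd : '-' ∉ s.toList := by
      rw [hsL]
      cases hg : PySem.List.pyGet? L 1 with
      | none => simp
      | some x =>
        simp only [Option.getD_some]
        have hxin : x.toList ∈ PySem.Chars.splitOn (p.getD "").toList ['-'] := by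
          rw [← hLmap]; exact List.mem_map_of_mem (mem_of_pyGet? L 1 x hg)
        exact splitOn_pieces_no_sep '-' (p.getD "").toList x.toList hxin
    cases hB2 : PySem.Str.isIn "B" ("I-" ++ s) with
    | false =>
      rw [pvResolve_eq_of_not_isIn _ (by simpa using hB2)]
      rfl
    | true =>
      rw [pvResolve_eq_of_isIn _ (by simpa using hB2)]
      have hsplit : PySem.Str.split? ("I-" ++ s) "-" = some ["I", s] := by
        have h := PySem.Str.split?_map ("I-" ++ s) "-"
        have htl : ("I-" ++ s).toList = ['I'] ++ '-' :: s.toList := by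
          rw [String.toList_append]; rfl
        rw [htl] at h
        have hval : PySem.Chars.split? (['I'] ++ '-' :: s.toList) ['-'] =
            some [['I'], s.toList] := by
          simp only [PySem.Chars.split?]
          rw [if_neg (by simp)]
          rw [splitOn_first '-' ['I'] s.toList (by simp), splitOn_no_sep '-' s.toList hnd]
        rw [show ("-" : String).toList = ['-'] from rfl, hval] at h
        cases hsp : PySem.Str.split? ("I-" ++ s) "-" with
        | none => rw [hsp] at h; simp at h
        | some M =>
          rw [hsp] at h
          simp only [Option.map_some, Option.some_inj] at h
          cases M with
          | nil => simp at h
          | cons a M' =>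
            cases M' with
            | nil => simp at h
            | cons b M'' =>
              cases M'' with
              | cons u v => simp at h
              | nil =>
                simp only [List.map_cons, List.map_nil, List.cons.injEq, and_true] at h
                obtain ⟨ha, hb⟩ := h
                have ha' : a = "I" := by
                  have := congrArg String.ofList ha
                  simpa [String.ofList_toList] using this
                have hb' : b = s := by
                  have := congrArg String.ofList hb
                  simpa [String.ofList_toList] using this
                rw [ha', hb']
      simp only [Option.getD_some]
      rw [hsplit]
      simp [PySem.List.pyGet?, PySem.List.pyIdx?]

-- A's per-element pass fills a maximal irrelevant run with the constant v when resolve(v) = v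
lemma pvFill_run (irr : String) (v : String) (hv : pvResolve (some v) = v) :
    ∀ ls : List String,
      pvFill irr (some v) ls =
        List.replicate (ls.takeWhile (fun x => x == irr)).length v ++
          pvFill irr (some v) (ls.dropWhile (fun x => x == irr)) := by
  intro ls
  induction ls with
  | nil => simp
  | cons h t ih =>
    by_cases hh : (h == irr) = true
    · simp only [pvFill, if_true, hv, List.takeWhile_cons, List.dropWhile_cons, hh,
        List.length_cons, List.replicate_succ, List.cons_append]
      rw [ih]
    · simp [pvFill, hh]

-- B's run-jumping pass equals A's per-element pass
lemma fillRuns_eq (irr : String) :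
    ∀ (ls out : List String),
      pvFillRuns irr out ls = out ++ pvFill irr out.getLast? ls := by
  have main : ∀ (n : Nat) (ls out : List String), ls.length ≤ n →
      pvFillRuns irr out ls = out ++ pvFill irr out.getLast? ls := by
    intro n
    induction n with
    | zero =>
      intro ls out hn
      have : ls = [] := List.length_eq_zero_iff.mp (Nat.le_zero.mp hn)
      subst this; simp [pvFillRuns, pvFill]
    | succ n ih =>
      intro ls out hn
      cases ls with
      | nil => simp [pvFillRuns, pvFill]
      | cons l t =>
        rw [pvFillRuns]
        by_cases hl : (l != irr) = true
        · rw [if_pos hl]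
          rw [ih t (out ++ [l]) (by simpa using hn)]
          have hli : (l == irr) = false := by simpa using hl
          simp [pvFill, hli]
        · rw [if_neg hl]
          have hli : (l == irr) = true := by simpa using hl
          have hdrop : (t.dropWhile (fun x => x == irr)).length ≤ n := by
            have := List.length_dropWhile_le (fun x => x == irr) t
            simp at hn; omega
          rw [ih _ _ hdrop]
          have hlast : (out ++ List.replicate (1 + (t.takeWhile (fun x => x == irr)).length)
              (pvResolve out.getLast?)).getLast? = some (pvResolve out.getLast?) := by
            rw [List.getLast?_append_of_ne_nil _ (by simp)]
            rw [List.getLast?_replicate]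
            simp
          rw [hlast]
          have hrun := pvFill_run irr (pvResolve out.getLast?) (pvResolve_idem out.getLast?) t
          simp only [pvFill, hli, if_true, hrun]
          simp [List.replicate_succ, Nat.add_comm 1]
  intro ls out
  exact main ls.length ls out le_rfl

-- ===== VERDICT (by name: the statement is the Claim_ definition above) =====
theorem simplify_labels_and_tokens_spec : Claim_equal_simplify_labels_and_tokens := by
  intro ts ls irr _ _
  unfold Spec_simplify_labels_and_tokens simplify_labels_and_tokens simplify_labels_and_tokens_alt
  simp [foldA_eq, fillRuns_eq]
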